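-- pv_equiv track=rewrite | github.com/songmac/BaekJoon-Programmers-Study | Python3/프로그래머스/1/135808. 과일 장수/과일 장수.py | solution
-- ===== SOURCE A (Python) =====
-- def solution(k, m, score):
--     score.sort(reverse=True)
--
--     a = []
--     box_sum = 0
--     for i in range(len(score) // m):
--         a.append(min(score[m*i:m*(i+1)]) * m)
--         box_sum += a[i]
--
--     return box_sum
-- ===== SOURCE B (Python) =====
-- def solution(k, m, score):
--     # Counting approach: no full sort of the data. Build a frequency table,
--     # walk the distinct values in descending order keeping a cumulative count c;
--     # positions p with (p+1) % m == 0 in the (virtual) descending arrangement are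
--     # the box minima, and a value v's run [c, c+cnt) contributes
--     # (c+cnt)//m - c//m such positions.
--     freq = {}
--     for v in score:
--         freq[v] = freq.get(v, 0) + 1
--     c = 0
--     total = 0
--     for v in sorted(freq, reverse=True):
--         cnt = freq[v]
--         total += v * ((c + cnt) // m - c // m)
--         c += cnt
--     return total * m
-- ===== Notes on version B (the rewrite author's own statement) =====
-- stated objective: alternative
-- what changed: Instead of sorting the whole list and scanning each m-sized box for its minimum, B builds a frequency table, sorts only the distinct values descending, and in one pass with a cumulative count c adds v * ((c+cnt)//m - c//m) per value, counting arithmetically how many box-minimum positions fall inside each value's run; B does not mutate the caller's list (return-value equivalence).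
-- outside the precondition, e.g. on solution(4, 0, [1, 2]): A raises ZeroDivisionError, B raises ZeroDivisionError; on solution(4, -1, [1, 2]): A returns 0, B returns 3
import Mathlib
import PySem

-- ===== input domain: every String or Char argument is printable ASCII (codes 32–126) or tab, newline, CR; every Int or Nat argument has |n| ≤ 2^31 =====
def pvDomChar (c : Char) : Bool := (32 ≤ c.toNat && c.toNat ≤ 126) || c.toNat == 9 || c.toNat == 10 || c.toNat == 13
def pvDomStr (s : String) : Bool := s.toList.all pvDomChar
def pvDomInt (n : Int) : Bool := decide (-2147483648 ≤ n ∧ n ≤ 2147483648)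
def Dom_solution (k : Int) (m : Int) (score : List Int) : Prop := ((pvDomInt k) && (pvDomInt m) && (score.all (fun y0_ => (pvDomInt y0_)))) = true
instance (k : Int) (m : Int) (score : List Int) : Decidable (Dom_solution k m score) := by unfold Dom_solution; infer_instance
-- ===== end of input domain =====

-- B replaces the sort-and-scan-each-box algorithm by a frequency-counter pass: it sorts only the
-- distinct values descending and counts box-minimum positions per value run arithmetically; B does
-- not sort the caller's list in place (A does), so the equivalence proved is about the RETURN value.


-- ===== PORT A =====
def solution (k : Int) (m : Int) (score : List Int) : Int :=
  let s := PySem.List.sorted score (fun x => x) true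
  let st := (PySem.List.pyRange 0 (PySem.Int.floordiv (s.length : Int) m) 1).foldl
    (fun (acc : List Int × Int) i =>
      -- a.append(min(score[m*i:m*(i+1)]) * m); box_sum += a[i]
      -- (min of an empty list would raise in Python; the .getD 0 is unreachable under Pre_)
      let v := (PySem.List.min? (PySem.List.slice s (some (m * i)) (some (m * (i + 1)))) (fun x => x)).getD 0 * m
      let a := acc.1 ++ [v]
      (a, acc.2 + ((PySem.List.pyGet? a i).getD 0))) ([], 0)
  st.2

-- ===== PORT B =====
def solution_alt (k : Int) (m : Int) (score : List Int) : Int :=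
  -- freq = {}; for v in score: freq[v] = freq.get(v, 0) + 1
  let freq := score.foldl (fun (d : PySem.Dict Int Int) v => d.insert v (d.getD v 0 + 1)) PySem.Dict.empty
  -- c = 0; total = 0; for v in sorted(freq, reverse=True): …
  let st := (PySem.List.sorted freq.keys (fun x => x) true).foldl
    (fun (acc : Int × Int) v =>
      let cnt := freq.getD v 0
      (acc.1 + cnt,
       acc.2 + v * (PySem.Int.floordiv (acc.1 + cnt) m - PySem.Int.floordiv acc.1 m)))
    (0, 0)
  st.2 * m

-- ===== PRECONDITION & SPEC =====
-- Pre_ excludes m ≤ 0: at m = 0 both A and B raise ZeroDivisionError, and a negative box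
-- size m < 0 is malformed input outside the task's natural domain (no valid number of boxes exists).
def Pre_solution (k : Int) (m : Int) (score : List Int) : Prop := 1 ≤ m
instance (k : Int) (m : Int) (score : List Int) : Decidable (Pre_solution k m score) := by unfold Pre_solution; infer_instance
def pvWitness_solution : Int × Int × List Int := (4, 2, [4, 1, 3, 2, 5])

def Spec_solution (k : Int) (m : Int) (score : List Int) (out : Int) : Prop := out = solution_alt k m score
instance (k : Int) (m : Int) (score : List Int) (out : Int) : Decidable (Spec_solution k m score out) := by unfold Spec_solution; infer_instance

-- ===== CLAIM (what is proved, stated in full; the proofs are below) =====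
def Claim_equal_solution : Prop := ∀ (k : Int) (m : Int) (score : List Int), Dom_solution k m score → Pre_solution k m score → Spec_solution k m score (solution k m score)

-- ===== LEMMAS AND PROOFS =====

-- A's loop over range(K) with the auxiliary list `a`: box_sum ends up the sum of f 0 .. f (K-1).
lemma loopA_eq (f : Int → Int) (K : Nat) :
    (PySem.List.pyRange 0 (K : Int) 1).foldl
      (fun (acc : List Int × Int) i =>
        let v := f i
        let a := acc.1 ++ [v]
        (a, acc.2 + ((PySem.List.pyGet? a i).getD 0))) ([], 0)
    = ((List.range K).map (fun (i : Nat) => f (i : Int)),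
       (((List.range K).map (fun (i : Nat) => f (i : Int))).sum)) := by
  induction K with
  | zero => simp
  | succ K ih =>
      rw [show ((K + 1 : Nat) : Int) = (K : Int) + 1 by push_cast; ring,
          PySem.List.pyRange_one_succ_right (by positivity), List.foldl_append, ih]
      simp [List.range_succ]

-- min of a nonempty descending-sorted list is its last element.
lemma min?_desc (l : List Int) (h : l.Pairwise (fun a b => b ≤ a)) (hne : l ≠ []) :
    PySem.List.min? l (fun x => x) = some (l.getLast hne) := by
  obtain ⟨v, hv⟩ : ∃ v, PySem.List.min? l (fun x => x) = some v := by
    rcases l with _ | ⟨x, t⟩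
    · exact absurd rfl hne
    · exact ⟨_, PySem.List.min?_id_cons x t⟩
  have hvmem : v ∈ l := PySem.List.min?_mem hv
  have hvmin : ∀ y ∈ l, v ≤ y := PySem.List.min?_isMin hv
  have hlastmem : l.getLast hne ∈ l := List.getLast_mem hne
  have hlastmin : ∀ y ∈ l, l.getLast hne ≤ y := by
    intro y hy
    obtain ⟨i, hi, rfl⟩ := List.getElem_of_mem hy
    rw [List.getLast_eq_getElem]
    rcases Nat.lt_or_ge i (l.length - 1) with hlt | hge
    · exact List.pairwise_iff_getElem.mp h i (l.length - 1) hi (by omega) hlt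
    · have : i = l.length - 1 := by omega
      subst this; exact le_refl _
  rw [hv]
  exact congrArg some (le_antisymm (hvmin _ hlastmem) (hlastmin _ hvmem))

-- the distinct values of score, sorted strictly descending
def keysDesc (score : List Int) : List Int :=
  PySem.List.sorted (PySem.Set.ofList score) (fun x => x) true

lemma nodup_keysDesc (score : List Int) : (keysDesc score).Nodup :=
  (PySem.List.sorted_perm _ _ _).nodup_iff.mpr (PySem.Set.nodup_ofList score)

lemma keysDesc_sdesc (score : List Int) :
    (keysDesc score).Pairwise (fun a b => b < a) := by
  have h1 : (keysDesc score).Pairwise (fun a b => b ≤ a) :=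
    PySem.List.sorted_pairwise_rev _ _
  have h2 : (keysDesc score).Nodup := nodup_keysDesc score
  exact (h1.and h2).imp (fun hp => lt_of_le_of_ne hp.1 (fun he => hp.2 he.symm))

lemma mem_keysDesc (score : List Int) (v : Int) : v ∈ keysDesc score ↔ v ∈ score := by
  rw [keysDesc, PySem.List.mem_sorted, PySem.Set.mem_ofList]

-- count in a flatMap of replicates over distinct keys
lemma count_flatMap_replicate (ks : List Int) (f : Int → Nat) (hnd : ks.Nodup) (u : Int) :
    (ks.flatMap (fun v => List.replicate (f v) v)).count u
    = if u ∈ ks then f u else 0 := by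
  induction ks with
  | nil => simp
  | cons v ks ih =>
      rw [List.flatMap_cons, List.count_append, ih (List.nodup_cons.mp hnd).2,
          List.count_replicate]
      have hvks : v ∉ ks := (List.nodup_cons.mp hnd).1
      by_cases h : u = v
      · subst h; simp [hvks]
      · simp [h, Ne.symm h]

-- flatMap of constant runs over a strictly descending key list is weakly descending
lemma pairwise_flatMap_replicate (ks : List Int) (f : Int → Nat)
    (h : ks.Pairwise (fun a b => b < a)) :
    (ks.flatMap (fun v => List.replicate (f v) v)).Pairwise (fun a b => b ≤ a) := by
  induction ks with
  | nil => simp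
  | cons v ks ih =>
      rw [List.flatMap_cons, List.pairwise_append]
      refine ⟨List.pairwise_replicate.mpr (by simp), ih h.of_cons, ?_⟩
      intro a ha b hb
      have ha' : a = v := List.eq_of_mem_replicate ha
      obtain ⟨w, hw, hb'⟩ := List.mem_flatMap.mp hb
      have hb' : b = w := List.eq_of_mem_replicate hb'
      subst ha'; subst hb'
      exact le_of_lt (List.rel_of_pairwise_cons h hw)

-- s (the descending sort of score) decomposes into constant runs over keysDesc
lemma sorted_eq_runs (score : List Int) :
    PySem.List.sorted score (fun x => x) true
    = (keysDesc score).flatMap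
        (fun v => List.replicate ((PySem.List.sorted score (fun x => x) true).count v) v) := by
  set s := PySem.List.sorted score (fun x => x) true with hs
  have hperm : s.Perm ((keysDesc score).flatMap (fun v => List.replicate (s.count v) v)) := by
    rw [List.perm_iff_count]
    intro u
    rw [count_flatMap_replicate (keysDesc score) (fun v => s.count v) (nodup_keysDesc score) u]
    by_cases hu : u ∈ keysDesc score
    · simp [hu]
    · rw [if_neg hu]
      have : u ∉ s := by
        rw [hs, PySem.List.mem_sorted]
        exact fun h => hu ((mem_keysDesc score u).mpr h)
      simp [List.count_eq_zero_of_not_mem this]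
  exact List.Perm.eq_of_pairwise
    (fun a b _ _ h1 h2 => le_antisymm h2 h1)
    (PySem.List.sorted_pairwise_rev _ _)
    (pairwise_flatMap_replicate _ _ (keysDesc_sdesc score))
    hperm

-- the sum of "box minima" read off s at positions M*j + (M-1), for the first c/M boxes
def pickSum (s : List Int) (M : Nat) (c : Nat) : Int :=
  ((List.range (c / M)).map (fun j => s.getD (M*j + (M-1)) 0)).sum

-- one run of cv equal values v occupying s[c .. c+cv) advances pickSum by v * (#new boxes)
lemma pickSum_step (s : List Int) (M : Nat) (hM : 1 ≤ M) (c cv : Nat) (v : Int)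
    (hle : c + cv ≤ s.length)
    (hval : ∀ p : Nat, c ≤ p → p < c + cv → s.getD p 0 = v) :
    pickSum s M (c + cv)
    = pickSum s M c + v * ((((c + cv) / M : Nat) : Int) - ((c / M : Nat) : Int)) := by
  have hM0 : 0 < M := hM
  obtain ⟨d, hd⟩ : ∃ d, (c + cv) / M = c / M + d :=
    ⟨(c + cv) / M - c / M,
     by have h : c / M ≤ (c + cv) / M := Nat.div_le_div_right (Nat.le_add_right c cv)
        omega⟩
  unfold pickSum
  rw [hd, List.range_add, List.map_append, List.sum_append, List.map_map]
  have hterm : ∀ j ∈ List.range d,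
      ((fun j => s.getD (M * j + (M - 1)) 0) ∘ fun x => c / M + x) j = v := by
    intro j hj
    rw [List.mem_range] at hj
    have h1 := Nat.div_add_mod c M
    have h2 := Nat.mod_lt c hM0
    have h3 := Nat.div_add_mod (c + cv) M
    have h4 := Nat.mod_lt (c + cv) hM0
    have hjd : M * (j + 1) ≤ M * d := Nat.mul_le_mul_left M (by omega)
    simp only [Function.comp_apply, Nat.mul_add]
    have hexp : M * ((c + cv) / M) = M * (c / M) + M * d := by
      rw [hd, Nat.mul_add]
    have hA : M * (c / M) = c / M * M := Nat.mul_comm _ _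
    have hB : M * ((c + cv) / M) = (c + cv) / M * M := Nat.mul_comm _ _
    set A := M * (c / M) with hsA
    set B := M * j with hsB
    set C := M * d with hsC
    have hMj1 : M * (j + 1) = B + M := by rw [Nat.mul_add, Nat.mul_one]
    have hub : A + B + M ≤ c + cv := by omega
    have hlb : c < A + M := by omega
    apply hval
    · omega
    · omega
  rw [List.map_congr_left hterm, List.map_const', List.sum_replicate, List.length_range,
      nsmul_eq_mul]
  push_cast [hd]
  ring

-- B's accumulator loop over the runs: total picks up pickSum s M n − pickSum s M c
lemma foldB_runs (s : List Int) (M : Nat) (hM : 1 ≤ M) (f : Int → Nat) :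
    ∀ (R : List Int) (c : Nat) (t : Int),
    c ≤ s.length →
    s.drop c = R.flatMap (fun v => List.replicate (f v) v) →
    (∀ v ∈ R, 1 ≤ f v) →
    R.foldl
      (fun (acc : Int × Int) v =>
        (acc.1 + (f v : Int),
         acc.2 + v * (PySem.Int.floordiv (acc.1 + (f v : Int)) (M : Int)
                      - PySem.Int.floordiv acc.1 (M : Int))))
      ((c : Int), t)
    = ((s.length : Int), t + pickSum s M s.length - pickSum s M c) := by
  intro R
  induction R with
  | nil =>
      intro c t hc hdrop _
      rw [List.flatMap_nil] at hdrop
      have : s.length ≤ c := List.drop_eq_nil_iff.mp hdrop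
      have hcn : c = s.length := by omega
      subst hcn
      simp [List.foldl_nil]
  | cons v R ih =>
      intro c t hc hdrop hpos
      have hcv1 : 1 ≤ f v := hpos v List.mem_cons_self
      rw [List.flatMap_cons] at hdrop
      have hlen : s.length - c = f v + (R.flatMap (fun v => List.replicate (f v) v)).length := by
        have := congrArg List.length hdrop
        simpa using this
      have hle : c + f v ≤ s.length := by omega
      have hdrop' : s.drop (c + f v) = R.flatMap (fun v => List.replicate (f v) v) := by
        rw [← List.drop_drop, hdrop, List.drop_left' (List.length_replicate)]
      have hval : ∀ p : Nat, c ≤ p → p < c + f v → s.getD p 0 = v := by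
        intro p hpc hplt
        have hp : p < s.length := by omega
        have hpd : p - c < (s.drop c).length := by
          rw [List.length_drop]; omega
        rw [List.getD_eq_getElem s 0 hp]
        have : s[p] = (s.drop c)[p - c] := by
          rw [List.getElem_drop]
          congr 1
          omega
        rw [this]
        simp only [hdrop]
        rw [List.getElem_append_left (by simpa using (by omega : p - c < f v)),
            List.getElem_replicate]
      simp only [List.foldl_cons]
      have hcast : ((c : Int) + (f v : Int)) = (((c + f v : Nat)) : Int) := by push_cast; ring
      rw [hcast, PySem.Int.floordiv_natCast, PySem.Int.floordiv_natCast]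
      rw [ih (c + f v) _ hle hdrop' (fun w hw => hpos w (List.mem_cons_of_mem v hw))]
      rw [pickSum_step s M hM c (f v) v hle hval]
      refine Prod.ext rfl ?_
      simp only
      ring

-- ===== VERDICT (by name: the statement is the Claim_ definition above) =====
theorem solution_spec : Claim_equal_solution := by
  intro k m score _ hpre
  unfold Pre_solution at hpre
  unfold Spec_solution
  obtain ⟨M, rfl, hM⟩ : ∃ M : Nat, m = (M : Int) ∧ 1 ≤ M :=
    ⟨m.toNat, by omega, by omega⟩
  unfold solution solution_alt
  set s := PySem.List.sorted score (fun x => x) true with hs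
  have hsp : s.Pairwise (fun a b => b ≤ a) :=
    PySem.List.sorted_pairwise_rev score (fun x => x)
  set n := s.length with hn
  set K := n / M with hK
  -- block bound
  have hKb : ∀ i : Nat, i ∈ List.range K → M * i + M ≤ n := by
    intro i hi
    rw [List.mem_range] at hi
    calc M * i + M = (i+1) * M := by ring
    _ ≤ K * M := Nat.mul_le_mul_right M (by omega)
    _ ≤ n := Nat.div_mul_le_self n M
  -- A's box i minimum is the element at position M*i + (M-1) of s
  have hblock : ∀ i : Nat, i ∈ List.range K →
      (PySem.List.min? (PySem.List.slice s (some ((M:Int) * (i:Int))) (some ((M:Int) * ((i:Int) + 1)))) (fun x => x)).getD 0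
      = s.getD (M * i + (M - 1)) 0 := by
    intro i hi
    have hb := hKb i hi
    have e1 : (M:Int) * (i:Int) = ((M * i : Nat) : Int) := by push_cast; ring
    have e2 : (M:Int) * ((i:Int) + 1) = ((M * i : Nat) : Int) + (M : Int) := by push_cast; ring
    rw [e1, e2, PySem.List.slice_natCast_add]
    set blk := (s.drop (M * i)).take M with hblk
    have hlen : blk.length = M := by
      simp [hblk]; omega
    have hne : blk ≠ [] := by
      intro hnil; rw [hnil] at hlen; simp at hlen; omega
    have hbp : blk.Pairwise (fun a b => b ≤ a) :=
      List.Pairwise.sublist ((List.take_sublist _ _).trans (List.drop_sublist _ _)) hsp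
    rw [min?_desc blk hbp hne]
    have hidx : M * i + (M - 1) < n := by omega
    have h2 : blk.getLast? = s[M * i + (M - 1)]? := by
      rw [List.getLast?_eq_getElem?, hlen]
      simp only [hblk]
      rw [List.getElem?_take_of_lt (by omega), List.getElem?_drop]
    have h3 : blk.getLast hne = s.getD (M * i + (M - 1)) 0 := by
      rw [List.getD_eq_getElem?_getD, ← h2, List.getLast?_eq_some_getLast hne, Option.getD_some]
    rw [h3]
    rfl
  -- A side: the loop is the sum of the box minima times M
  simp only [PySem.Int.floordiv_natCast, ← hn, ← hK]
  rw [loopA_eq (fun i => (PySem.List.min? (PySem.List.slice s (some ((M:Int) * i)) (some ((M:Int) * (i + 1)))) (fun x => x)).getD 0 * (M:Int)) K]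
  simp only
  rw [List.map_congr_left (fun i hi => by rw [hblock i hi] :
        ∀ i ∈ List.range K,
          (PySem.List.min? (PySem.List.slice s (some ((M:Int) * (i:Int))) (some ((M:Int) * ((i:Int) + 1)))) (fun x => x)).getD 0 * (M:Int)
          = s.getD (M * i + (M - 1)) 0 * (M:Int)),
      List.sum_map_mul_right]
  -- B side: the counter is Counter(score), its keys sorted descending are keysDesc score
  rw [PySem.Dict.foldl_insert_getD_add_one_eq_counter, PySem.Dict.keys_counter]
  have hcnt : ∀ v : Int, (PySem.Dict.counter score).getD v 0 = (s.count v : Int) := by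
    intro v
    rw [PySem.Dict.getD_counter]
    exact_mod_cast ((PySem.List.sorted_perm score (fun x => x) true).count_eq v).symm
  rw [show PySem.List.sorted (PySem.Set.ofList score) (fun x => x) true = keysDesc score from rfl]
  have hfun : ∀ (acc : Int × Int) (v : Int), v ∈ keysDesc score →
      (acc.1 + (PySem.Dict.counter score).getD v 0,
       acc.2 + v * (PySem.Int.floordiv (acc.1 + (PySem.Dict.counter score).getD v 0) (M:Int)
                    - PySem.Int.floordiv acc.1 (M:Int)))
      = ((acc.1 + ((s.count v : Nat) : Int),
          acc.2 + v * (PySem.Int.floordiv (acc.1 + ((s.count v : Nat) : Int)) (M:Int)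
                       - PySem.Int.floordiv acc.1 (M:Int))) : Int × Int) := by
    intro acc v _
    simp only [hcnt]
  rw [PySem.List.foldl_congr_mem (keysDesc score) _
        (fun (acc : Int × Int) v =>
          (acc.1 + ((s.count v : Nat) : Int),
           acc.2 + v * (PySem.Int.floordiv (acc.1 + ((s.count v : Nat) : Int)) (M:Int)
                        - PySem.Int.floordiv acc.1 (M:Int))))
        (0, 0) hfun]
  have hpos : ∀ v ∈ keysDesc score, 1 ≤ s.count v := by
    intro v hv
    have : v ∈ s := by
      rw [hs, PySem.List.mem_sorted]
      exact (mem_keysDesc score v).mp hv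
    exact List.count_pos_iff.mpr this
  have hfold := foldB_runs s M hM (fun v => s.count v) (keysDesc score) 0 0
      (Nat.zero_le _) (by rw [List.drop_zero]; exact sorted_eq_runs score) hpos
  simp only [Nat.cast_zero] at hfold
  rw [hfold]
  have hp0 : pickSum s M 0 = 0 := by
    unfold pickSum
    rw [Nat.zero_div]
    simp
  rw [hp0]
  unfold pickSum
  rw [← hn, ← hK]
  ring
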